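-- pv_equiv track=rewrite | github.com/WORKER1worker/STGNP-1 | data/dataset/convert_sm_nq_to_csv.py | build_merge_priority
-- ===== SOURCE A (Python) =====
-- from typing import Dict, List, Tuple
--
-- def build_merge_priority(cols: List[str], base_id: str) -> List[str]:
--     """Primary station first, then supplementary stations by suffix order."""
--     cols = [c for c in cols if c.startswith(base_id)]
--
--     primary = [c for c in cols if c == base_id]
--     supplementary = [c for c in cols if c != base_id]
--
--     def suffix_key(station: str):
--         suffix = station.split('-', 1)[1] if '-' in station else ''
--         number = int(suffix) if suffix.isdigit() else 9999
--         return number, suffix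
--
--     supplementary = sorted(supplementary, key=suffix_key)
--     return primary + supplementary
-- ===== SOURCE B (Python) =====
-- def build_merge_priority(cols, base_id):
--     """Single online pass with an ordered-insert accumulator instead of
--     filter + split + library sort + concatenate: primaries are appended in order,
--     each supplementary column is inserted into its sorted place as it is seen."""
--     primaries = []
--     supp = []  # kept sorted by (number, suffix) at all times
--     for c in cols:
--         if not c.startswith(base_id):
--             continue
--         if c == base_id:
--             primaries.append(c)
--             continue
--         suffix = c.split('-', 1)[1] if '-' in c else ''
--         k = (int(suffix) if suffix.isdigit() else 9999, suffix)
--         pos = len(supp)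
--         for j, s in enumerate(supp):
--             sfx = s.split('-', 1)[1] if '-' in s else ''
--             if k < (int(sfx) if sfx.isdigit() else 9999, sfx):
--                 pos = j
--                 break
--         supp.insert(pos, c)
--     return primaries + supp
-- ===== Notes on version B (the rewrite author's own statement) =====
-- stated objective: alternative
-- what changed: Replaces A's three filter passes, library sort of the supplementary list and concatenation by one online pass over the columns that appends primaries and inserts each supplementary column into its sorted position in an accumulator as it is seen.
import Mathlib
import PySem

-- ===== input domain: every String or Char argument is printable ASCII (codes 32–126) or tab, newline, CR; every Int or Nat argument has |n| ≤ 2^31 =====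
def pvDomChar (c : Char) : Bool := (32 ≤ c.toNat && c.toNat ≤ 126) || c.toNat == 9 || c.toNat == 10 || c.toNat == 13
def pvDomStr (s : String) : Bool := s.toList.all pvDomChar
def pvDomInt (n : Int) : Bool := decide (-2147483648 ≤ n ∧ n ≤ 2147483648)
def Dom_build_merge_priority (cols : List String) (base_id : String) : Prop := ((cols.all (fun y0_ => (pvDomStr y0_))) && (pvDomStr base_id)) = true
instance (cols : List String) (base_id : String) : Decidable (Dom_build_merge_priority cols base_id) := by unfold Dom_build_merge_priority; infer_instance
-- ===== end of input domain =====

-- B replaces A's filter/split/library-sort/concatenate with ONE online pass over the columns that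
-- appends primaries and inserts each supplementary column into its sorted place as it is seen
-- (objective: alternative — same result, different traversal; not claimed faster).


-- ===== PORT A =====
-- suffix_key's first line: station.split('-', 1)[1] if '-' in station else ''
-- ('-' ∈ station guarantees the split has a part at index 1, so List.getD is exactly Python's [1])
def pvSuffix (station : String) : String :=
  if PySem.Str.isIn "-" station then ((PySem.Str.splitMax? station "-" 1).getD []).getD 1 ""
  else ""

-- suffix_key's second line: int(suffix) if suffix.isdigit() else 9999
-- (suffix.isdigit() guarantees int(suffix) succeeds, so the getD 0 default is never taken)
def pvNumber (station : String) : Int :=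
  let suffix := pvSuffix station
  if PySem.Str.strIsdigit suffix then (PySem.Int.ofStr? suffix).getD 0 else 9999

def build_merge_priority (cols : List String) (base_id : String) : List String :=
  let cols := cols.filter (fun c => PySem.Str.startswith c base_id)
  let primary := cols.filter (fun c => c == base_id)
  let supplementary := cols.filter (fun c => c != base_id)
  primary ++ PySem.List.sorted2 supplementary pvNumber pvSuffix

-- ===== PORT B =====
-- Python tuple comparison k < key(s): (n1, s1) < (n2, s2) ⟺ n1 < n2 ∨ (n1 = n2 ∧ s1 < s2)
def bBefore (x y : String) : Bool :=
  decide (pvNumber x < pvNumber y) ||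
    (decide (pvNumber x = pvNumber y) && decide (pvSuffix x < pvSuffix y))

-- Source B's position-scan + supp.insert(pos, c), as the obvious structural recursion over supp
def bInsert (x : String) : List String → List String
  | [] => [x]
  | y :: ys => if bBefore x y then x :: y :: ys else y :: bInsert x ys

def build_merge_priority_alt (cols : List String) (base_id : String) : List String :=
  let st := cols.foldl (fun (st : List String × List String) c =>
    if !(PySem.Str.startswith c base_id) then st
    else if c == base_id then (st.1 ++ [c], st.2)
    else (st.1, bInsert c st.2)) ([], [])
  st.1 ++ st.2

-- ===== PRECONDITION & SPEC =====
def Spec_build_merge_priority (cols : List String) (base_id : String) (out : List String) : Prop := out = build_merge_priority_alt cols base_id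
instance (cols : List String) (base_id : String) (out : List String) : Decidable (Spec_build_merge_priority cols base_id out) := by unfold Spec_build_merge_priority; infer_instance

-- ===== CLAIM (what is proved, stated in full; the proofs are below) =====
def Claim_equal_build_merge_priority : Prop := ∀ (cols : List String) (base_id : String), Dom_build_merge_priority cols base_id → Spec_build_merge_priority cols base_id (build_merge_priority cols base_id)

-- ===== LEMMAS AND PROOFS =====

-- A's comparison: the insertion test sorted2 uses for key (pvNumber, pvSuffix)
def ltA (a b : String) : Bool :=
  decide (pvNumber a < pvNumber b) || (!decide (pvNumber b < pvNumber a) && decide (pvSuffix a < pvSuffix b))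

lemma bBefore_eq_ltA (x y : String) : bBefore x y = ltA x y := by
  simp only [bBefore, ltA]
  rcases lt_trichotomy (pvNumber x) (pvNumber y) with h | h | h
  · simp [h]
  · simp [h]
  · simp [h, not_lt_of_gt h, (ne_of_gt h)]

lemma bInsert_eq_insertBy (x : String) (ys : List String) :
    bInsert x ys = PySem.List.insertBy ltA x ys := by
  induction ys with
  | nil => rfl
  | cons y ys ih => simp only [bInsert, PySem.List.insertBy, bBefore_eq_ltA]; rw [ih]

lemma sorted2_A_eq_foldl (supp : List String) :
    PySem.List.sorted2 supp pvNumber pvSuffix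
      = supp.foldl (fun acc x => PySem.List.insertBy ltA x acc) [] := rfl

lemma loop_invariant (bid : String) (l : List String) :
    ∀ (prim supp : List String),
    l.foldl (fun (st : List String × List String) c =>
        if !(PySem.Str.startswith c bid) then st
        else if c == bid then (st.1 ++ [c], st.2)
        else (st.1, bInsert c st.2)) (prim, supp)
      = (prim ++ ((l.filter (fun c => PySem.Str.startswith c bid)).filter (fun c => c == bid)),
         ((l.filter (fun c => PySem.Str.startswith c bid)).filter (fun c => c != bid)).foldl
            (fun acc x => PySem.List.insertBy ltA x acc) supp) := by
  induction l with
  | nil => intro prim supp; simp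
  | cons x l ih =>
    intro prim supp
    by_cases hsw : PySem.Str.startswith x bid = true
    · have hsw' : PySem.Chars.startswith x.toList bid.toList = true := by
        simpa [PySem.Str.startswith] using hsw
      by_cases hx : x = bid
      · subst hx
        rw [List.foldl_cons, if_neg (by simp [hsw']), if_pos (by simp), ih (prim ++ [x]) supp]
        simp [hsw']
      · have hne : (x == bid) = false := by simp [hx]
        rw [List.foldl_cons, if_neg (by simp [hsw']), if_neg (by simp [hx]),
          ih prim (bInsert x supp), bInsert_eq_insertBy]
        simp [hsw', hx]
    · have hsw' : PySem.Chars.startswith x.toList bid.toList = false := by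
        simpa [PySem.Str.startswith] using hsw
      rw [List.foldl_cons, if_pos (by simp [hsw']), ih prim supp]
      simp [hsw']

-- ===== VERDICT (by name: the statement is the Claim_ definition above) =====
theorem build_merge_priority_spec : Claim_equal_build_merge_priority := by
  intro cols base_id _
  simp only [Spec_build_merge_priority, build_merge_priority, build_merge_priority_alt]
  rw [loop_invariant base_id cols [] [], sorted2_A_eq_foldl]
  simp
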